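-- pv_equiv track=rewrite | github.com/std-modelware/polytech-diskrete-2020 | Danilov Nikita/Lab_2/Symmetry.py | defineSymmetry
-- ===== SOURCE A (Python) =====
-- def defineSymmetry(Comb):
--     SymComb = set()
--     n = len(Comb)
--     for _ in range(n):
--         if n % 2 == 1:
--             if Comb[:n//2] == Comb[-1:-n//2:-1]:
--                 SymComb.add(Comb[:n//2] + "(" + Comb[n//2] + ")" + Comb[n//2 + 1:])
--         else:
--             if Comb[1:n//2] == Comb[-1:-n//2:-1]:
--                 SymComb.add("(" + Comb[0] + ")" + Comb[1:n//2] + "(" + Comb[n//2] + ")" + Comb[n//2 + 1:])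
--             if Comb[:n//2] == Comb[-1:-n//2 - 1:-1]:
--                 SymComb.add(Comb[:n//2] + "|" + Comb[n//2:])
--         Comb = Comb[1:] + Comb[0]
--     return SymComb
-- ===== SOURCE B (Python) =====
-- def _rad(d, c, gap):
--     # length of the maximal matching extension: largest k such that
--     # d[c-1-j] == d[c+gap+j] for all j < k, staying inside d.
--     k = 0
--     while c - 1 - k >= 0 and c + gap + k < len(d) and d[c - 1 - k] == d[c + gap + k]:
--         k += 1
--     return k
--
--
-- def defineSymmetry(Comb):
--     # Rotations of Comb repeat with its minimal rotation period p (found with one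
--     # C-level find on the doubled string), so only the first min(n, p) rotations can
--     # contribute; for those, the symmetry tests become threshold comparisons against
--     # expand-around-center palindromic radii on the doubled string, and an annotated
--     # string is built only for a rotation that matches.
--     n = len(Comb)
--     d = Comb + Comb
--     m = n // 2
--     p = d.find(Comb, 1)        # minimal rotation period (n >= 1 ==> 1 <= p <= n)
--     q = min(n, p)              # p == -1 only when n == 0
--     odd = [_rad(d, i + m, 1) for i in range(q)]   # d[i+m-1-j] vs d[i+m+1+j]
--     even = [_rad(d, i + m, 0) for i in range(q)]  # d[i+m-1-j] vs d[i+m+j]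
--     res = set()
--     for i in range(q):
--         if n % 2 == 1:
--             if odd[i] >= m:                       # rotation i is a palindrome
--                 t = d[i:i + n]
--                 res.add(t[:m] + "(" + t[m] + ")" + t[m + 1:])
--         else:
--             if odd[i] >= m - 1:                   # rotation i minus first char is a palindrome
--                 t = d[i:i + n]
--                 res.add("(" + t[0] + ")" + t[1:m] + "(" + t[m] + ")" + t[m + 1:])
--             if even[i] >= m:                      # rotation i is an even palindrome
--                 t = d[i:i + n]
--                 res.add(t[:m] + "|" + t[m:])
--     return res
-- ===== Notes on version B (the rewrite author's own statement) =====
-- stated objective: faster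
-- what changed: Instead of rotating the string and comparing reversed slices for each of the n rotations, B finds the minimal rotation period p with one find on the doubled string, visits only the p distinct rotations, and replaces each rotation's slice comparisons by threshold tests against precomputed expand-around-center palindromic radii, building an annotated string only for a rotation that matches.
import Mathlib
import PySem

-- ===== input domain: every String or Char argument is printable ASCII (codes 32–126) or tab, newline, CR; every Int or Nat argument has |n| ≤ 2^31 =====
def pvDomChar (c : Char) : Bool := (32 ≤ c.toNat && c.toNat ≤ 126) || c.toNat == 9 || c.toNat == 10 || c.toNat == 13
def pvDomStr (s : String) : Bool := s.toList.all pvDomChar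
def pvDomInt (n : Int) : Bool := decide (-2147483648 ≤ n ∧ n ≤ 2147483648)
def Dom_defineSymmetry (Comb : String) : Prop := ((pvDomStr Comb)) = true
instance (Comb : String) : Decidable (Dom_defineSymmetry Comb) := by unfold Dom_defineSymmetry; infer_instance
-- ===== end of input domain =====

-- B visits only the minimal-rotation-period many distinct rotations (one find on the
-- doubled string) and replaces A's per-rotation slice comparisons by threshold tests
-- against precomputed expand-around-center palindromic radii; measurably faster,
-- identical return value.


-- ===== PORT A =====
-- loop body of A ('for _ in range(n)'); the element is ignored, state = (SymComb, Comb).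
-- Python's 1-character string Comb[k] is ported as the 1-character Lean string
-- String.ofList [·]; the default ' ' of getD is never used: the body only runs when
-- n ≥ 1, so indices 0 and n//2 are in range and step -1 ≠ 0 makes slice? return some.
def pvStepA (n : Int) (st : PySem.Set String × String) (_x : Int) :
    PySem.Set String × String :=
  let SymComb := st.1
  let C := st.2
  let SymComb' : PySem.Set String :=
    if PySem.Int.mod n 2 = 1 then
      -- if Comb[:n//2] == Comb[-1:-n//2:-1]:
      if PySem.Str.slice C none (some (PySem.Int.floordiv n 2)) =
         (PySem.Str.slice? C (some (-1)) (some (PySem.Int.floordiv (-n) 2)) (-1)).getD "" then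
        PySem.Set.add SymComb
          (PySem.Str.slice C none (some (PySem.Int.floordiv n 2)) ++ "(" ++
           String.ofList [(PySem.Str.pyGet? C (PySem.Int.floordiv n 2)).getD ' '] ++ ")" ++
           PySem.Str.slice C (some (PySem.Int.floordiv n 2 + 1)) none)
      else SymComb
    else
      -- if Comb[1:n//2] == Comb[-1:-n//2:-1]:
      let S1 : PySem.Set String :=
        if PySem.Str.slice C (some 1) (some (PySem.Int.floordiv n 2)) =
           (PySem.Str.slice? C (some (-1)) (some (PySem.Int.floordiv (-n) 2)) (-1)).getD "" then
          PySem.Set.add SymComb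
            ("(" ++ String.ofList [(PySem.Str.pyGet? C 0).getD ' '] ++ ")" ++
             PySem.Str.slice C (some 1) (some (PySem.Int.floordiv n 2)) ++ "(" ++
             String.ofList [(PySem.Str.pyGet? C (PySem.Int.floordiv n 2)).getD ' '] ++ ")" ++
             PySem.Str.slice C (some (PySem.Int.floordiv n 2 + 1)) none)
        else SymComb
      -- if Comb[:n//2] == Comb[-1:-n//2 - 1:-1]:
      if PySem.Str.slice C none (some (PySem.Int.floordiv n 2)) =
         (PySem.Str.slice? C (some (-1)) (some (PySem.Int.floordiv (-n) 2 - 1)) (-1)).getD "" then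
        PySem.Set.add S1
          (PySem.Str.slice C none (some (PySem.Int.floordiv n 2)) ++ "|" ++
           PySem.Str.slice C (some (PySem.Int.floordiv n 2)) none)
      else S1
  -- Comb = Comb[1:] + Comb[0]
  (SymComb', PySem.Str.slice C (some 1) none ++
             String.ofList [(PySem.Str.pyGet? C 0).getD ' '])

def defineSymmetry (Comb : String) : List String :=
  let n : Int := PySem.Str.len Comb
  ((PySem.List.pyRange 0 n).foldl (pvStepA n) (PySem.Set.empty, Comb)).1

-- ===== PORT B =====
-- _rad's while loop; fuel bounds the iteration count: the guard c+gap+k < |d| forces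
-- k < |d|, so |d|+1 steps of fuel are never exhausted before the guard fails.
def pvRadAux (d : List Char) (c gap : Nat) : Nat → Nat → Nat
  | k, 0 => k
  | k, fuel+1 =>
    if 1 + k ≤ c && c + gap + k < d.length &&
       (d.getD (c - 1 - k) ' ' == d.getD (c + gap + k) ' ') then
      pvRadAux d c gap (k+1) fuel
    else k

-- _rad(d, c, gap)
def pvRad (d : List Char) (c gap : Nat) : Nat := pvRadAux d c gap 0 (d.length + 1)

-- loop body of B's result loop (list defaults of getD are never used: all indices are
-- in range when the body runs)
def pvStepB (n m : Nat) (d : List Char) (odd even : List Nat)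
    (res : PySem.Set String) (i : Nat) : PySem.Set String :=
  if n % 2 = 1 then
    if m ≤ odd.getD i 0 then
      let t := (d.drop i).take n
      PySem.Set.add res
        (String.ofList (t.take m ++ ['('] ++ [t.getD m ' '] ++ [')'] ++ t.drop (m+1)))
    else res
  else
    let res1 : PySem.Set String :=
      if m - 1 ≤ odd.getD i 0 then
        let t := (d.drop i).take n
        PySem.Set.add res
          (String.ofList (['('] ++ [t.getD 0 ' '] ++ [')'] ++ (t.drop 1).take (m-1) ++
                          ['('] ++ [t.getD m ' '] ++ [')'] ++ t.drop (m+1)))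
      else res
    if m ≤ even.getD i 0 then
      let t := (d.drop i).take n
      PySem.Set.add res1 (String.ofList (t.take m ++ ['|'] ++ t.drop m))
    else res1

def defineSymmetry_alt (Comb : String) : List String :=
  let l := Comb.toList
  let n := l.length
  let d := l ++ l
  let m := n / 2
  let p : Int := PySem.Chars.findFrom d l 1    -- d.find(Comb, 1)
  let q : Nat := (min (n : Int) p).toNat       -- min(n, p); p = -1 only when n = 0
  let odd := (List.range q).map (fun i => pvRad d (i+m) 1)
  let even := (List.range q).map (fun i => pvRad d (i+m) 0)
  (List.range q).foldl (pvStepB n m d odd even) PySem.Set.empty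

-- ===== PRECONDITION & SPEC =====
def Spec_defineSymmetry (Comb : String) (out : List String) : Prop :=
  out = defineSymmetry_alt Comb
instance (Comb : String) (out : List String) : Decidable (Spec_defineSymmetry Comb out) := by
  unfold Spec_defineSymmetry; infer_instance

-- ===== CLAIM (what is proved, stated in full; the proofs are below) =====
def Claim_equal_defineSymmetry : Prop :=
  ∀ (Comb : String), Dom_defineSymmetry Comb → Spec_defineSymmetry Comb (defineSymmetry Comb)

-- ===== LEMMAS AND PROOFS =====

-- rotation by i: the value of A's loop variable Comb after i iterations
def pvRot (l : List Char) (i : Nat) : List Char := l.drop i ++ l.take i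

-- the guard of _rad's while loop at offset j, as a Prop
def pvCond (d : List Char) (c gap j : Nat) : Prop :=
  1 + j ≤ c ∧ c + gap + j < d.length ∧ d.getD (c - 1 - j) ' ' = d.getD (c + gap + j) ' '

lemma pvRot_length (l : List Char) (i : Nat) : (pvRot l i).length = l.length := by
  simp [pvRot]; omega

lemma pvRot_zero (l : List Char) : pvRot l 0 = l := by simp [pvRot]

lemma pvRot_take_drop (l : List Char) (i : Nat) (h : i ≤ l.length) :
    ((l ++ l).drop i).take l.length = pvRot l i := by
  rw [List.drop_append_of_le_length h, List.take_append]
  have h1 : (l.drop i).length ≤ l.length := by simp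
  rw [List.take_of_length_le h1]
  simp [pvRot, Nat.sub_sub_self h]


lemma pvRot_getElem (l : List Char) (i j : Nat) (hi : i ≤ l.length) (hj : j < l.length) :
    (pvRot l i).getD j ' ' = (l ++ l).getD (i + j) ' ' := by
  rw [← pvRot_take_drop l i hi]
  rw [List.getD_eq_getElem?_getD, List.getD_eq_getElem?_getD]
  rw [List.getElem?_take, List.getElem?_drop]
  simp [hj, Nat.add_comm i j]


lemma pvRot_succ (l : List Char) (i : Nat) (h : i < l.length) :
    (pvRot l i).tail ++ [(pvRot l i).getD 0 ' '] = pvRot l (i+1) := by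
  have hd : l.drop i = l[i] :: l.drop (i+1) := (List.getElem_cons_drop h).symm
  unfold pvRot
  rw [List.take_succ_eq_append_getElem h, hd]
  simp only [List.cons_append, List.tail_cons, List.getD_cons_zero, List.append_assoc]


lemma pvGuard_iff (d : List Char) (c gap k : Nat) :
    (1 + k ≤ c && c + gap + k < d.length &&
       (d.getD (c - 1 - k) ' ' == d.getD (c + gap + k) ' ')) = true ↔ pvCond d c gap k := by
  simp [pvCond, and_assoc]

lemma k_le_pvRadAux (d : List Char) (c gap : Nat) :
    ∀ (fuel k : Nat), k ≤ pvRadAux d c gap k fuel := by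
  intro fuel
  induction fuel with
  | zero => intro k; simp [pvRadAux]
  | succ f ih =>
    intro k
    rw [pvRadAux]
    split
    · exact le_trans (by omega) (ih (k+1))
    · exact le_refl k

lemma le_pvRadAux (d : List Char) (c gap : Nat) :
    ∀ (m fuel k : Nat), m ≤ fuel → (∀ j, k ≤ j → j < k + m → pvCond d c gap j) →
      k + m ≤ pvRadAux d c gap k fuel := by
  intro m
  induction m with
  | zero => intro fuel k _ _; simpa using k_le_pvRadAux d c gap fuel k
  | succ m ih =>
    intro fuel k hf hc
    obtain ⟨f, rfl⟩ : ∃ f, fuel = f + 1 := ⟨fuel - 1, by omega⟩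
    rw [pvRadAux, if_pos ((pvGuard_iff d c gap k).mpr (hc k (le_refl k) (by omega)))]
    have := ih f (k+1) (by omega) (fun j h1 h2 => hc j (by omega) (by omega))
    omega


lemma pvRadAux_cond (d : List Char) (c gap : Nat) :
    ∀ (fuel k m : Nat), k + m ≤ pvRadAux d c gap k fuel →
      ∀ j, k ≤ j → j < k + m → pvCond d c gap j := by
  intro fuel
  induction fuel with
  | zero => intro k m h j h1 h2; rw [pvRadAux] at h; omega
  | succ f ih =>
    intro k m h j h1 h2
    rw [pvRadAux] at h
    by_cases hg : (1 + k ≤ c && c + gap + k < d.length &&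
       (d.getD (c - 1 - k) ' ' == d.getD (c + gap + k) ' ')) = true
    · rw [if_pos hg] at h
      rcases Nat.eq_or_lt_of_le h1 with heq | hlt
      · exact heq ▸ (pvGuard_iff d c gap k).mp hg
      · exact ih (k+1) (m-1) (by omega) j (by omega) (by omega)
    · rw [if_neg hg] at h; omega


lemma pvRad_ge_iff' (d : List Char) (c gap m : Nat) (hm : m ≤ d.length + 1) :
    m ≤ pvRadAux d c gap 0 (d.length + 1) ↔ ∀ j < m, pvCond d c gap j := by
  constructor
  · intro h j hj
    exact pvRadAux_cond d c gap (d.length + 1) 0 m (by simpa using h) j (Nat.zero_le j) (by omega)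
  · intro h
    simpa using le_pvRadAux d c gap m (d.length + 1) 0 hm (fun j h1 h2 => h j (by omega))

-- xs[-1:-b:-1] for 1 ≤ b ≤ len(xs)
lemma getD_eq_getElem' (t : List Char) (x : Nat) (h : x < t.length) :
    t.getD x ' ' = t[x] := by
  rw [List.getD_eq_getElem?_getD, List.getElem?_eq_getElem h]; rfl

lemma rotD (l : List Char) (i x y : Nat) (hi : i ≤ l.length) (hx : x < l.length)
    (h : i + x = y) : (pvRot l i).getD x ' ' = (l ++ l).getD y ' ' := by
  rw [pvRot_getElem l i x hi hx, h]

lemma gen1 (t : List Char) (a e c : Nat) (ha : a + c ≤ t.length) (he : e ≤ t.length)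
    (hlen : t.length - e = c) :
    ((t.drop a).take c = (t.drop e).reverse) ↔
      ∀ j < c, t.getD (a+j) ' ' = t.getD (t.length - 1 - j) ' ' := by
  have l1 : ((t.drop a).take c).length = c := by simp; omega
  have l2 : ((t.drop e).reverse).length = c := by simpa using hlen
  constructor
  · intro h j hj
    have hh := List.getElem_of_eq h (show j < ((t.drop a).take c).length by omega)
    rw [List.getElem_take, List.getElem_drop, List.getElem_reverse, List.getElem_drop] at hh
    rw [getD_eq_getElem' t (a+j) (by omega), getD_eq_getElem' t (t.length - 1 - j) (by omega)]
    rw [hh]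
    congr 1
    simp only [List.length_drop]
    omega
  · intro h
    apply List.ext_getElem (by omega)
    intro j h1 h2
    rw [List.getElem_take, List.getElem_drop, List.getElem_reverse, List.getElem_drop]
    rw [l1] at h1
    have hq := h j h1
    rw [getD_eq_getElem' t (a+j) (by omega),
        getD_eq_getElem' t (t.length - 1 - j) (by omega)] at hq
    rw [hq]
    congr 1
    simp only [List.length_drop]
    omega

-- xs[-1:-b:-1] for 1 ≤ b ≤ len(xs)
lemma slice?_rev (xs : List Char) (b : Nat) (hb : 1 ≤ b) (hbL : b ≤ xs.length) :
    PySem.List.slice? xs (some (-1)) (some (-(b:Int))) (-1) =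
      some ((xs.drop (xs.length - b + 1)).reverse) := by
  have hind : PySem.List.sliceIndices xs.length (some (-1)) (some (-(b:Int))) (-1)
      = ((xs.length : Int) - 1, (xs.length : Int) - b, -1) := by
    simp only [PySem.List.sliceIndices]
    norm_num
    constructor <;> omega
  rw [PySem.List.slice?]
  rw [if_neg (by norm_num), hind]
  simp only []
  have hcount : (if (0:Int) < -1 then
      if (xs.length : Int) - 1 < (xs.length : Int) - b then
        ((((xs.length : Int) - b) - ((xs.length : Int) - 1) + -1 - 1) / -1).toNat else 0
      else if (xs.length : Int) - b < (xs.length : Int) - 1 then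
        ((((xs.length : Int) - 1) - ((xs.length : Int) - b) + -(-1) - 1) / -(-1)).toNat else 0)
      = b - 1 := by
    rw [if_neg (by norm_num)]
    split
    · simp only [neg_neg, Int.ediv_one]; omega
    · omega
  rw [hcount]
  congr 1
  have hmap : ∀ k ∈ List.range (b-1),
      xs[((xs.length : Int) - 1 + -1 * k).toNat]? =
        some (xs.getD (xs.length - 1 - k) ' ') := by
    intro k hk
    simp only [List.mem_range] at hk
    have h1 : ((xs.length : Int) - 1 + -1 * k).toNat = xs.length - 1 - k := by omega
    rw [h1, List.getD_eq_getElem?_getD, List.getElem?_eq_getElem (by omega)]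
    simp
  rw [List.filterMap_congr hmap]
  rw [show (fun x => some (xs.getD (xs.length - 1 - x) ' ')) =
        some ∘ (fun x => xs.getD (xs.length - 1 - x) ' ') from rfl, List.filterMap_eq_map]
  apply List.ext_getElem
  · simp; omega
  · intro j h1 h2
    simp only [List.getElem_map, List.getElem_range, List.getElem_reverse, List.getElem_drop]
    simp only [List.length_map, List.length_range] at h1
    have hx : xs.length - 1 - j < xs.length := by omega
    rw [List.getD_eq_getElem?_getD, List.getElem?_eq_getElem hx]
    simp only [Option.getD_some]
    congr 1
    simp only [List.length_drop]
    omega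


lemma condOdd_iff (l : List Char) (i m : Nat) (hn : l.length = 2*m+1) (hi : i < l.length) :
    ((pvRot l i).take m = ((pvRot l i).drop (m+1)).reverse) ↔
      m ≤ pvRad (l ++ l) (i+m) 1 := by
  have ht := pvRot_length l i
  rw [pvRad]
  rw [show (pvRot l i).take m = ((pvRot l i).drop 0).take m by simp]
  rw [gen1 (pvRot l i) 0 (m+1) m (by omega) (by omega) (by omega)]
  rw [pvRad_ge_iff' (l++l) (i+m) 1 m (by simp; omega)]
  simp only [ht]
  constructor
  · intro h j hj
    refine ⟨by omega, by simp only [List.length_append]; omega, ?_⟩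
    have h1 := h (m-1-j) (by omega)
    rw [rotD l i _ (i+m-1-j) (by omega) (by omega) (by omega),
        rotD l i _ (i+m+1+j) (by omega) (by omega) (by omega)] at h1
    exact h1
  · intro h j hj
    have h1 := (h (m-1-j) (by omega)).2.2
    rw [rotD l i _ (i+m-1-(m-1-j)) (by omega) (by omega) (by omega),
        rotD l i _ (i+m+1+(m-1-j)) (by omega) (by omega) (by omega)]
    exact h1


lemma condEvenA_iff (l : List Char) (i m : Nat) (hn : l.length = 2*m) (hm : 1 ≤ m)
    (hi : i < l.length) :
    (((pvRot l i).drop 1).take (m-1) = ((pvRot l i).drop (m+1)).reverse) ↔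
      m - 1 ≤ pvRad (l ++ l) (i+m) 1 := by
  have ht := pvRot_length l i
  rw [pvRad]
  rw [gen1 (pvRot l i) 1 (m+1) (m-1) (by omega) (by omega) (by omega)]
  rw [pvRad_ge_iff' (l++l) (i+m) 1 (m-1) (by simp; omega)]
  simp only [ht]
  constructor
  · intro h j hj
    refine ⟨by omega, by simp only [List.length_append]; omega, ?_⟩
    have h1 := h (m-2-j) (by omega)
    rw [rotD l i _ (i+m-1-j) (by omega) (by omega) (by omega),
        rotD l i _ (i+m+1+j) (by omega) (by omega) (by omega)] at h1
    exact h1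
  · intro h j hj
    have h1 := (h (m-2-j) (by omega)).2.2
    rw [rotD l i _ (i+m-1-(m-2-j)) (by omega) (by omega) (by omega),
        rotD l i _ (i+m+1+(m-2-j)) (by omega) (by omega) (by omega)]
    exact h1


lemma condEvenB_iff (l : List Char) (i m : Nat) (hn : l.length = 2*m) (hi : i < l.length) :
    ((pvRot l i).take m = ((pvRot l i).drop m).reverse) ↔
      m ≤ pvRad (l ++ l) (i+m) 0 := by
  have ht := pvRot_length l i
  rw [pvRad]
  rw [show (pvRot l i).take m = ((pvRot l i).drop 0).take m by simp]
  rw [gen1 (pvRot l i) 0 m m (by omega) (by omega) (by omega)]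
  rw [pvRad_ge_iff' (l++l) (i+m) 0 m (by simp; omega)]
  simp only [ht]
  constructor
  · intro h j hj
    refine ⟨by omega, by simp only [List.length_append]; omega, ?_⟩
    have h1 := h (m-1-j) (by omega)
    rw [rotD l i _ (i+m-1-j) (by omega) (by omega) (by omega),
        rotD l i _ (i+m+0+j) (by omega) (by omega) (by omega)] at h1
    exact h1
  · intro h j hj
    have h1 := (h (m-1-j) (by omega)).2.2
    rw [rotD l i _ (i+m-1-(m-1-j)) (by omega) (by omega) (by omega),
        rotD l i _ (i+m+0+(m-1-j)) (by omega) (by omega) (by omega)]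
    exact h1


lemma strSliceRev (C : String) (b : Nat) (hb : 1 ≤ b) (hbL : b ≤ C.toList.length) :
    (PySem.Str.slice? C (some (-1)) (some (-(b:Int))) (-1)).getD "" =
      String.ofList ((C.toList.drop (C.toList.length - b + 1)).reverse) := by
  have h := PySem.Str.slice?_map C (some (-1)) (some (-(b:Int))) (-1)
  rw [PySem.Chars.slice?_eq_listSlice?] at h
  rw [slice?_rev C.toList b hb hbL] at h
  cases hs : PySem.Str.slice? C (some (-1)) (some (-(b:Int))) (-1) with
  | none => rw [hs] at h; simp at h
  | some s =>
    rw [hs] at h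
    simp only [Option.map_some, Option.some.injEq] at h
    simp only [Option.getD_some]
    exact String.toList_inj.mp (by rw [h, String.toList_ofList])

lemma mapRange_getD (f : Nat → Nat) (K j : Nat) (h : j < K) :
    ((List.range K).map f).getD j 0 = f j := by
  rw [List.getD_eq_getElem?_getD, List.getElem?_map, List.getElem?_range h]
  rfl

lemma mapRange'_getD (f : Nat → Nat) (K j : Nat) (h : j < K) :
    ((List.range' 0 K).map f).getD j 0 = f j := by
  rw [show List.range' 0 K = List.range K from List.range_eq_range'.symm]
  exact mapRange_getD f K j h

lemma step_eq (l : List Char) (i : Nat) (S : PySem.Set String) (C : String) (x : Int)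
    (hi : i < l.length) (hC : C.toList = pvRot l i) :
    (pvStepA (l.length : Int) (S, C) x).1 =
      pvStepB l.length (l.length / 2) (l ++ l)
        ((List.range l.length).map (fun j => pvRad (l ++ l) (j + l.length / 2) 1))
        ((List.range l.length).map (fun j => pvRad (l ++ l) (j + l.length / 2) 0)) S i ∧
    (pvStepA (l.length : Int) (S, C) x).2.toList = pvRot l (i+1) := by
  have ht := pvRot_length l i
  have hfd : PySem.Int.floordiv ((l.length:Nat):Int) 2 = ((l.length / 2 : Nat):Int) := by
    exact_mod_cast PySem.Int.floordiv_natCast l.length 2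
  have hmod : PySem.Int.mod ((l.length:Nat):Int) 2 = ((l.length % 2 : Nat):Int) := by
    exact_mod_cast PySem.Int.mod_natCast l.length 2
  have p1 : PySem.Str.slice C none (some ((l.length / 2 : Nat):Int)) =
      String.ofList ((pvRot l i).take (l.length / 2)) := by
    rw [← String.toList_inj]
    simp only [PySem.Str.toList_slice, PySem.Chars.slice_eq_listSlice, String.toList_ofList]
    rw [PySem.List.slice_to_natCast, hC]
  have p2 : PySem.Str.slice C (some 1) (some ((l.length / 2 : Nat):Int)) =
      String.ofList (((pvRot l i).drop 1).take (l.length / 2 - 1)) := by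
    rw [← String.toList_inj]
    simp only [PySem.Str.toList_slice, PySem.Chars.slice_eq_listSlice, String.toList_ofList]
    rw [PySem.List.slice_toNat C.toList (by norm_num) (by positivity)]
    simp [hC]
    omega
  have p3 : PySem.Str.slice C (some (((l.length / 2 : Nat):Int) + 1)) none =
      String.ofList ((pvRot l i).drop (l.length / 2 + 1)) := by
    rw [← String.toList_inj]
    simp only [PySem.Str.toList_slice, PySem.Chars.slice_eq_listSlice, String.toList_ofList]
    rw [show (((l.length / 2 : Nat):Int) + 1) = (((l.length / 2 + 1 : Nat)):Int) by push_cast; ring]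
    rw [PySem.List.slice_from_natCast, hC]
  have p4 : PySem.Str.slice C (some ((l.length / 2 : Nat):Int)) none =
      String.ofList ((pvRot l i).drop (l.length / 2)) := by
    rw [← String.toList_inj]
    simp only [PySem.Str.toList_slice, PySem.Chars.slice_eq_listSlice, String.toList_ofList]
    rw [PySem.List.slice_from_natCast, hC]
  have p5 : PySem.Str.slice C (some 1) none = String.ofList ((pvRot l i).tail) := by
    rw [← String.toList_inj]
    simp only [PySem.Str.toList_slice, PySem.Chars.slice_eq_listSlice, String.toList_ofList]
    rw [PySem.List.slice_from_one, hC]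
  have g0 : (PySem.Str.pyGet? C 0).getD ' ' = (pvRot l i).getD 0 ' ' := by
    rw [show (0:Int) = ((0:Nat):Int) from rfl, PySem.Str.pyGet?_natCast, hC,
        ← List.getD_eq_getElem?_getD]
  have gM : (PySem.Str.pyGet? C ((l.length / 2 : Nat):Int)).getD ' ' =
      (pvRot l i).getD (l.length / 2) ' ' := by
    rw [PySem.Str.pyGet?_natCast, hC, ← List.getD_eq_getElem?_getD]
  constructor
  · show (if PySem.Int.mod ((l.length:Nat):Int) 2 = 1 then _ else _) = _
    by_cases hp : l.length % 2 = 1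
    · -- odd length
      have hN2 : l.length = 2 * (l.length / 2) + 1 := by omega
      have e1 : PySem.Int.floordiv (-((l.length:Nat):Int)) 2 =
          -(((l.length / 2 + 1 : Nat)):Int) := by
        rw [PySem.Int.floordiv_eq_iff_of_pos (by norm_num)]
        constructor <;> (push_cast; omega)
      have q1 : (PySem.Str.slice? C (some (-1))
            (some (PySem.Int.floordiv (-((l.length:Nat):Int)) 2)) (-1)).getD "" =
          String.ofList (((pvRot l i).drop (l.length / 2 + 1)).reverse) := by
        rw [e1, strSliceRev C (l.length / 2 + 1) (by omega) (by rw [hC, ht]; omega)]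
        rw [hC, ht, show l.length - (l.length / 2 + 1) + 1 = l.length / 2 + 1 by omega]
      have hstr : PySem.Str.slice C none (some ((l.length / 2 : Nat):Int)) ++ "(" ++
            String.ofList [(PySem.Str.pyGet? C ((l.length / 2 : Nat):Int)).getD ' '] ++ ")" ++
            PySem.Str.slice C (some (((l.length / 2 : Nat):Int) + 1)) none =
          String.ofList ((pvRot l i).take (l.length / 2) ++ ['('] ++
            [(pvRot l i).getD (l.length / 2) ' '] ++ [')'] ++
            (pvRot l i).drop (l.length / 2 + 1)) := by
        rw [p1, p3, gM, ← String.toList_inj]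
        simp [String.toList_append]
      simp only [pvStepB]
      rw [hmod, hfd, hp]
      rw [if_pos (show (((1:Nat):Int) = 1) by norm_num), if_pos (show ((1:Nat) = 1) from rfl)]
      rw [q1, hstr, p1]
      rw [mapRange_getD _ _ _ (by omega)]
      rw [pvRot_take_drop l i (by omega)]
      by_cases hcond : (pvRot l i).take (l.length / 2) =
          ((pvRot l i).drop (l.length / 2 + 1)).reverse
      · rw [if_pos (by rw [← String.toList_inj]; simpa using hcond),
            if_pos ((condOdd_iff l i (l.length / 2) hN2 hi).mp hcond)]
      · rw [if_neg (fun hh => hcond (by simpa using String.toList_inj.mpr hh)),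
            if_neg (fun hh => hcond ((condOdd_iff l i (l.length / 2) hN2 hi).mpr hh))]
    · -- even length
      have hp' : l.length % 2 = 0 := by omega
      have hm1 : 1 ≤ l.length / 2 := by omega
      have hN2 : l.length = 2 * (l.length / 2) := by omega
      have e1 : PySem.Int.floordiv (-((l.length:Nat):Int)) 2 =
          -(((l.length / 2 : Nat)):Int) := by
        rw [PySem.Int.floordiv_eq_iff_of_pos (by norm_num)]
        constructor <;> (push_cast; omega)
      have q2 : (PySem.Str.slice? C (some (-1))
            (some (PySem.Int.floordiv (-((l.length:Nat):Int)) 2)) (-1)).getD "" =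
          String.ofList (((pvRot l i).drop (l.length / 2 + 1)).reverse) := by
        rw [e1, strSliceRev C (l.length / 2) (by omega) (by rw [hC, ht]; omega)]
        rw [hC, ht, show l.length - l.length / 2 + 1 = l.length / 2 + 1 by omega]
      have q3 : (PySem.Str.slice? C (some (-1))
            (some (PySem.Int.floordiv (-((l.length:Nat):Int)) 2 - 1)) (-1)).getD "" =
          String.ofList (((pvRot l i).drop (l.length / 2)).reverse) := by
        rw [e1, show -(((l.length / 2 : Nat)):Int) - 1 = -(((l.length / 2 + 1 : Nat)):Int) by
              push_cast; ring]
        rw [strSliceRev C (l.length / 2 + 1) (by omega) (by rw [hC, ht]; omega)]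
        rw [hC, ht, show l.length - (l.length / 2 + 1) + 1 = l.length / 2 by omega]
      have hstrA : ("(" ++ String.ofList [(PySem.Str.pyGet? C 0).getD ' '] ++ ")" ++
            PySem.Str.slice C (some 1) (some ((l.length / 2 : Nat):Int)) ++ "(" ++
            String.ofList [(PySem.Str.pyGet? C ((l.length / 2 : Nat):Int)).getD ' '] ++ ")" ++
            PySem.Str.slice C (some (((l.length / 2 : Nat):Int) + 1)) none) =
          String.ofList (['('] ++ [(pvRot l i).getD 0 ' '] ++ [')'] ++
            ((pvRot l i).drop 1).take (l.length / 2 - 1) ++ ['('] ++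
            [(pvRot l i).getD (l.length / 2) ' '] ++ [')'] ++
            (pvRot l i).drop (l.length / 2 + 1)) := by
        rw [p2, p3, g0, gM, ← String.toList_inj]
        simp [String.toList_append]
      have hstrB : (PySem.Str.slice C none (some ((l.length / 2 : Nat):Int)) ++ "|" ++
            PySem.Str.slice C (some ((l.length / 2 : Nat):Int)) none) =
          String.ofList ((pvRot l i).take (l.length / 2) ++ ['|'] ++
            (pvRot l i).drop (l.length / 2)) := by
        rw [p1, p4, ← String.toList_inj]
        simp [String.toList_append]
      simp only [pvStepB]
      rw [hmod, hfd, hp']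
      rw [if_neg (show ¬(((0:Nat):Int) = 1) by norm_num), if_neg (show ¬((0:Nat) = 1) by norm_num)]
      rw [q2, q3, hstrA, hstrB, p1, p2]
      rw [mapRange_getD _ _ _ (by omega), mapRange_getD _ _ _ (by omega)]
      rw [pvRot_take_drop l i (by omega)]
      have iffA : (String.ofList (((pvRot l i).drop 1).take (l.length / 2 - 1)) =
          String.ofList (((pvRot l i).drop (l.length / 2 + 1)).reverse)) ↔
          (l.length / 2 - 1 ≤ pvRad (l ++ l) (i + l.length / 2) 1) := by
        rw [← String.toList_inj]
        simp only [String.toList_ofList]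
        exact condEvenA_iff l i (l.length / 2) hN2 hm1 hi
      have iffB : (String.ofList ((pvRot l i).take (l.length / 2)) =
          String.ofList (((pvRot l i).drop (l.length / 2)).reverse)) ↔
          (l.length / 2 ≤ pvRad (l ++ l) (i + l.length / 2) 0) := by
        rw [← String.toList_inj]
        simp only [String.toList_ofList]
        exact condEvenB_iff l i (l.length / 2) hN2 hi
      simp only [iffA, iffB]
  · show (PySem.Str.slice C (some 1) none ++
        String.ofList [(PySem.Str.pyGet? C 0).getD ' ']).toList = pvRot l (i+1)
    rw [p5, g0, ← pvRot_succ l i hi]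
    simp [String.toList_append]

lemma fold_eq (l : List Char) :
    ∀ (k i : Nat) (S : PySem.Set String) (C : String), i + k = l.length →
      C.toList = pvRot l i →
      ((PySem.List.pyRange (i : Int) (l.length : Int)).foldl
          (pvStepA (l.length : Int)) (S, C)).1 =
        (List.range' i k).foldl
          (pvStepB l.length (l.length / 2) (l ++ l)
            ((List.range l.length).map (fun j => pvRad (l ++ l) (j + l.length / 2) 1))
            ((List.range l.length).map (fun j => pvRad (l ++ l) (j + l.length / 2) 0))) S := by
  intro k
  induction k with
  | zero =>
    intro i S C hik hC
    rw [PySem.List.pyRange_one_eq_nil (by exact_mod_cast (by omega : l.length ≤ i)),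
        List.range'_zero]
    rfl
  | succ k ih =>
    intro i S C hik hC
    have hilt : (i:Int) < (l.length:Int) := by exact_mod_cast (by omega : i < l.length)
    rw [PySem.List.pyRange_one_cons hilt, List.range'_succ, List.foldl_cons, List.foldl_cons]
    obtain ⟨h1, h2⟩ := step_eq l i S C i (by omega) hC
    rw [show ((i:Int)+1) = (((i+1:Nat)):Int) by push_cast; ring]
    rw [show pvStepA ((l.length:Nat):Int) (S, C) (i:Int) =
          ((pvStepA ((l.length:Nat):Int) (S, C) (i:Int)).1,
           (pvStepA ((l.length:Nat):Int) (S, C) (i:Int)).2) from rfl]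
    rw [ih (i+1) _ _ (by omega) h2, h1]

-- ===== rotation-period and absorption lemmas =====

lemma pvRot_eq_rotate (l : List Char) (i : Nat) (h : i ≤ l.length) :
    pvRot l i = l.rotate i := (List.rotate_eq_drop_append_take h).symm

lemma rotate_mul_period (l : List Char) (P : Nat) (hP : l.rotate P = l) :
    ∀ s : Nat, l.rotate (s * P) = l := by
  intro s
  induction s with
  | zero => simp
  | succ s ih => rw [Nat.succ_mul, ← List.rotate_rotate, ih, hP]

lemma prefix_iff_rot (l : List Char) (j : Nat) (hj : j ≤ l.length) :
    l <+: (l ++ l).drop j ↔ pvRot l j = l := by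
  rw [List.prefix_iff_eq_take, pvRot_take_drop l j hj]
  exact eq_comm

lemma period_facts (l : List Char) (hn : 1 ≤ l.length) :
    ∃ P : Nat, PySem.Chars.findFrom (l ++ l) l 1 = (P : Int) ∧ 1 ≤ P ∧ P ≤ l.length ∧
      pvRot l P = l ∧ ∀ j, 1 ≤ j → j < P → pvRot l j ≠ l := by
  have hk : (1:Nat) ≤ (l ++ l).length := by simp; omega
  have hc1 : (1:Int) = ((1:Nat):Int) := by norm_num
  have hinf : l <:+: (l ++ l).drop 1 := by
    rw [List.drop_append_of_le_length hn]
    exact (List.suffix_append _ l).isInfix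
  have hne : PySem.Chars.findFrom (l ++ l) l (((1:Nat)):Int) ≠ -1 := by
    intro hEq
    rw [PySem.Chars.findFrom_natCast_eq_neg_one_iff (l++l) l 1 hk] at hEq
    exact hEq hinf
  obtain ⟨hg1, h2, h3⟩ := PySem.Chars.findFrom_natCast_spec (l++l) l 1 hk hne
  have hnn : 0 ≤ PySem.Chars.findFrom (l ++ l) l (((1:Nat)):Int) := by
    have := hg1
    omega
  have hlen : (PySem.Chars.findFrom (l ++ l) l (((1:Nat)):Int)).toNat ≤ l.length := by
    have hle := h2.length_le
    simp only [List.length_drop, List.length_append] at hle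
    omega
  refine ⟨(PySem.Chars.findFrom (l ++ l) l (((1:Nat)):Int)).toNat, ?_, by omega, hlen, ?_, ?_⟩
  · rw [hc1, Int.toNat_of_nonneg hnn]
  · exact (prefix_iff_rot l _ hlen).mp h2
  · intro j hj1 hj2 hrot
    exact h3 j hj1 hj2 ((prefix_iff_rot l j (by omega)).mpr hrot)

lemma rot_mod (l : List Char) (P i : Nat) (_h1 : 1 ≤ P) (hPn : P ≤ l.length)
    (hrot : pvRot l P = l) (hi : i ≤ l.length) :
    pvRot l i = pvRot l (i % P) := by
  have hr : l.rotate P = l := by rw [← pvRot_eq_rotate l P hPn]; exact hrot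
  rw [pvRot_eq_rotate l i hi, pvRot_eq_rotate l (i % P) (le_trans (Nat.mod_le i P) hi)]
  have e : i = (i / P) * P + i % P := by
    rw [mul_comm]
    exact (Nat.div_add_mod i P).symm
  conv_lhs => rw [e]
  rw [← List.rotate_rotate, rotate_mul_period l P hr]

lemma stepP_mod (l : List Char) (P i : Nat) (S : PySem.Set String)
    (h1 : 1 ≤ P) (hPn : P ≤ l.length) (hrot : pvRot l P = l) (hi : i < l.length) :
    pvStepB l.length (l.length / 2) (l ++ l)
      ((List.range l.length).map (fun j => pvRad (l ++ l) (j + l.length / 2) 1))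
      ((List.range l.length).map (fun j => pvRad (l ++ l) (j + l.length / 2) 0)) S i =
    pvStepB l.length (l.length / 2) (l ++ l)
      ((List.range l.length).map (fun j => pvRad (l ++ l) (j + l.length / 2) 1))
      ((List.range l.length).map (fun j => pvRad (l ++ l) (j + l.length / 2) 0)) S (i % P) := by
  have himod : i % P < l.length := lt_of_lt_of_le (Nat.mod_lt _ (by omega)) hPn
  have hmd := rot_mod l P i h1 hPn hrot (le_of_lt hi)
  simp only [pvStepB]
  rw [mapRange_getD _ _ _ (by omega : i < l.length),
      mapRange_getD _ _ _ (by omega : i % P < l.length),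
      mapRange_getD _ _ _ (by omega : i < l.length),
      mapRange_getD _ _ _ (by omega : i % P < l.length)]
  rw [pvRot_take_drop l i (by omega), pvRot_take_drop l (i % P) (by omega)]
  by_cases hp : l.length % 2 = 1
  · simp only [if_pos hp]
    have hN2 : l.length = 2 * (l.length / 2) + 1 := by omega
    have e1 : (l.length / 2 ≤ pvRad (l ++ l) (i + l.length / 2) 1) ↔
        (l.length / 2 ≤ pvRad (l ++ l) (i % P + l.length / 2) 1) := by
      rw [← condOdd_iff l i _ hN2 hi, ← condOdd_iff l (i % P) _ hN2 himod, hmd]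
    rw [hmd]
    simp only [e1]
  · simp only [if_neg hp]
    have hp' : l.length % 2 = 0 := by omega
    have hm1 : 1 ≤ l.length / 2 := by omega
    have hN2 : l.length = 2 * (l.length / 2) := by omega
    have e1 : (l.length / 2 - 1 ≤ pvRad (l ++ l) (i + l.length / 2) 1) ↔
        (l.length / 2 - 1 ≤ pvRad (l ++ l) (i % P + l.length / 2) 1) := by
      rw [← condEvenA_iff l i _ hN2 hm1 hi, ← condEvenA_iff l (i % P) _ hN2 hm1 himod, hmd]
    have e2 : (l.length / 2 ≤ pvRad (l ++ l) (i + l.length / 2) 0) ↔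
        (l.length / 2 ≤ pvRad (l ++ l) (i % P + l.length / 2) 0) := by
      rw [← condEvenB_iff l i _ hN2 hi, ← condEvenB_iff l (i % P) _ hN2 himod, hmd]
    rw [hmd]
    simp only [e1, e2]

lemma add_mem_eq (S : PySem.Set String) (x : String) (h : x ∈ S) :
    PySem.Set.add S x = S := by
  simp [PySem.Set.add, PySem.Set.contains]
  exact h

lemma step_mem_iff (n m : Nat) (d : List Char) (o e : List Nat) (S : PySem.Set String)
    (i : Nat) (x : String) :
    x ∈ pvStepB n m d o e S i ↔
      x ∈ S ∨ x ∈ pvStepB n m d o e PySem.Set.empty i := by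
  simp only [pvStepB]
  split_ifs <;> (simp [PySem.Set.mem_add, PySem.Set.empty]; try tauto)

lemma step_absorbed (n m : Nat) (d : List Char) (o e : List Nat) (S : PySem.Set String)
    (i : Nat) (h : ∀ x ∈ pvStepB n m d o e PySem.Set.empty i, x ∈ S) :
    pvStepB n m d o e S i = S := by
  simp only [pvStepB] at h ⊢
  by_cases hodd : n % 2 = 1
  · simp only [if_pos hodd] at h ⊢
    split_ifs with hc
    · rw [if_pos hc] at h
      exact add_mem_eq _ _ (h _ ((PySem.Set.mem_add _ _ _).mpr (Or.inr rfl)))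
    · rfl
  · simp only [if_neg hodd] at h ⊢
    split_ifs with hB hA hA2
    · rw [if_pos hB, if_pos hA] at h
      have hsA : _ ∈ S := h _ ((PySem.Set.mem_add _ _ _).mpr
        (Or.inl ((PySem.Set.mem_add _ _ _).mpr (Or.inr rfl))))
      have hsB : _ ∈ S := h _ ((PySem.Set.mem_add _ _ _).mpr (Or.inr rfl))
      rw [add_mem_eq _ _ hsA, add_mem_eq _ _ hsB]
    · rw [if_pos hB, if_neg hA] at h
      exact add_mem_eq _ _ (h _ ((PySem.Set.mem_add _ _ _).mpr (Or.inr rfl)))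
    · rw [if_neg hB, if_pos hA2] at h
      exact add_mem_eq _ _ (h _ ((PySem.Set.mem_add _ _ _).mpr (Or.inr rfl)))
    · rfl

lemma mem_fold (n m : Nat) (d : List Char) (o e : List Nat) :
    ∀ (lst : List Nat) (S : PySem.Set String) (x : String), x ∈ S →
      x ∈ lst.foldl (pvStepB n m d o e) S := by
  intro lst
  induction lst with
  | nil => intro S x h; simpa using h
  | cons a rest ih =>
    intro S x h
    rw [List.foldl_cons]
    exact ih _ x ((step_mem_iff n m d o e S a x).mpr (Or.inl h))

lemma K_sub_fold (n m : Nat) (d : List Char) (o e : List Nat) :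
    ∀ (lst : List Nat) (S : PySem.Set String) (j : Nat), j ∈ lst →
      ∀ x ∈ pvStepB n m d o e PySem.Set.empty j, x ∈ lst.foldl (pvStepB n m d o e) S := by
  intro lst
  induction lst with
  | nil => intro S j hj; simp at hj
  | cons a rest ih =>
    intro S j hj x hx
    rw [List.foldl_cons]
    rcases List.mem_cons.mp hj with rfl | hj'
    · exact mem_fold n m d o e rest _ x ((step_mem_iff n m d o e S j x).mpr (Or.inr hx))
    · exact ih _ j hj' x hx

lemma fold_absorb (n m : Nat) (d : List Char) (o e : List Nat) :
    ∀ (lst : List Nat) (S : PySem.Set String),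
      (∀ i ∈ lst, ∀ x ∈ pvStepB n m d o e PySem.Set.empty i, x ∈ S) →
      lst.foldl (pvStepB n m d o e) S = S := by
  intro lst
  induction lst with
  | nil => intro S _; rfl
  | cons a rest ih =>
    intro S h
    rw [List.foldl_cons, step_absorbed n m d o e S a (h a (by simp))]
    exact ih S (fun i hi => h i (by simp [hi]))

-- ===== VERDICT (by name: the statement is the Claim_ definition above) =====
theorem defineSymmetry_spec : Claim_equal_defineSymmetry := by
  intro Comb _
  unfold Spec_defineSymmetry defineSymmetry defineSymmetry_alt
  simp only []
  by_cases hn : Comb.toList.length = 0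
  · -- empty string: both sides fold over the empty range
    have hq : (min ((Comb.toList.length : Nat) : Int)
        (PySem.Chars.findFrom (Comb.toList ++ Comb.toList) Comb.toList 1)).toNat = 0 := by
      rw [hn]
      have : min ((0:Nat):Int) (PySem.Chars.findFrom (Comb.toList ++ Comb.toList) Comb.toList 1)
          ≤ 0 := by simp
      omega
    rw [hq]
    have hA : PySem.List.pyRange 0 ((PySem.Str.len Comb)) = ([] : List Int) := by
      apply PySem.List.pyRange_one_eq_nil
      simp [PySem.Str.len, hn]
    rw [hA]
    simp
  · have hn1 : 1 ≤ Comb.toList.length := by omega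
    obtain ⟨P, hfp, hP1, hPn, hProt, hPmin⟩ := period_facts Comb.toList hn1
    have hq : (min ((Comb.toList.length : Nat) : Int)
        (PySem.Chars.findFrom (Comb.toList ++ Comb.toList) Comb.toList 1)).toNat = P := by
      rw [hfp]
      have : min ((Comb.toList.length : Nat) : Int) ((P:Nat):Int) = ((P:Nat):Int) := by
        apply min_eq_right
        exact_mod_cast hPn
      rw [this]
      exact Int.toNat_natCast P
    rw [hq]
    have h := fold_eq Comb.toList Comb.toList.length 0 PySem.Set.empty Comb
      (by omega) (by simp [pvRot_zero])
    simp only [Nat.cast_zero] at h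
    have hA : PySem.Str.len Comb = ((Comb.toList.length : Nat) : Int) := by
      simp [PySem.Str.len]
    rw [hA, h]
    -- split the full range into the first period and the absorbed tail
    have hsplit : List.range' 0 Comb.toList.length =
        List.range' 0 P ++ List.range' P (Comb.toList.length - P) := by
      conv_lhs => rw [show Comb.toList.length = P + (Comb.toList.length - P) by omega]
      rw [← List.range'_append_1]
      norm_num
    rw [hsplit, List.foldl_append]
    rw [fold_absorb _ _ _ _ _ _ _ (by
      intro i hi x hx
      have hiP : P ≤ i ∧ i < Comb.toList.length := by
        have := List.mem_range'_1.mp hi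
        omega
      have hstep := stepP_mod Comb.toList P i PySem.Set.empty hP1 hPn hProt hiP.2
      rw [hstep] at hx
      exact K_sub_fold _ _ _ _ _ (List.range' 0 P) PySem.Set.empty (i % P)
        (by
          rw [List.mem_range'_1]
          constructor
          · omega
          · have : i % P < P := Nat.mod_lt _ (by omega)
            omega)
        x hx)]
    -- the port's (length-q) radius arrays agree with the full arrays on the visited indices
    rw [List.range_eq_range']
    rw [show List.range P = List.range' 0 P from List.range_eq_range']
    apply PySem.List.foldl_congr_mem
    intro acc x hx
    have hxP : x < P := by
      have := List.mem_range'_1.mp hx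
      omega
    simp only [pvStepB]
    rw [mapRange'_getD _ _ _ (by omega : x < Comb.toList.length),
        mapRange'_getD _ _ _ (by omega : x < P),
        mapRange'_getD _ _ _ (by omega : x < Comb.toList.length),
        mapRange'_getD _ _ _ (by omega : x < P)]
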